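-- pv_equiv track=rewrite | github.com/MrBrantCode/unitest_baseline | mut_generate/mist_train_cf/cf_88510/solution.py | most_frequent_element
-- ===== SOURCE A (Python) =====
-- def most_frequent_element(lst):
--     frequency = {}
--     for num in lst:
--         if num in frequency:
--             frequency[num] += 1
--         else:
--             frequency[num] = 1
--
--     most_frequent = None
--     max_frequency = 0
--     for num, count in frequency.items():
--         if count >= 3 and count > max_frequency:
--             most_frequent = num
--             max_frequency = count
--
--     return most_frequent
-- ===== SOURCE B (Python) =====
-- def most_frequent_element(lst):
--     # Dict-free: one pass over the list itself; at each first occurrence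
--     # (tracked by a seen-set) count the value directly with lst.count and
--     # keep the strict-> threshold maximum.
--     best = None
--     best_count = 0
--     seen = set()
--     for x in lst:
--         if x in seen:
--             continue
--         seen.add(x)
--         c = lst.count(x)
--         if c >= 3 and c > best_count:
--             best, best_count = x, c
--     return best
-- ===== Notes on version B (the rewrite author's own statement) =====
-- stated objective: alternative
-- what changed: Drops the frequency dictionary: B makes one pass over the list itself, skipping repeats via a seen-set and counting each first occurrence directly with lst.count, keeping the strict-> threshold maximum inline -- no counting structure and no separate items scan.
import Mathlib
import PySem

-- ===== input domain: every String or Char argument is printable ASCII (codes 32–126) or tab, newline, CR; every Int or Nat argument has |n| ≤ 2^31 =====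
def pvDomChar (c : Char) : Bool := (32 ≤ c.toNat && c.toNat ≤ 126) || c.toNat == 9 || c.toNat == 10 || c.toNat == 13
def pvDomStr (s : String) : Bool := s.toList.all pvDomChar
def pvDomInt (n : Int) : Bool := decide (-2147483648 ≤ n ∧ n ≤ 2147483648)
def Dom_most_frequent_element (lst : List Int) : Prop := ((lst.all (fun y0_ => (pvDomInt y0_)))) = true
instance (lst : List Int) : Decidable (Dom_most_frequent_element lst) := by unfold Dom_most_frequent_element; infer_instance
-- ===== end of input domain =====

-- B drops A's frequency dictionary: one pass over the list itself, skipping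
-- repeats via a seen-set and counting each first occurrence with lst.count,
-- keeping the strict-> threshold maximum (alternative decomposition; not faster).

-- ===== PORT A =====
def most_frequent_element (lst : List Int) : Option Int :=
  let frequency := lst.foldl
    (fun d num => if d.contains num then d.modify num 0 (· + 1) else d.insert num 1)
    PySem.Dict.empty
  (frequency.items.foldl
    (fun (st : Option Int × Int) p =>
      if 3 ≤ p.2 ∧ st.2 < p.2 then (some p.1, p.2) else st)
    ((none : Option Int), (0 : Int))).1

-- ===== PORT B =====
def most_frequent_element_alt (lst : List Int) : Option Int :=
  (lst.foldl
    (fun (p : (Option Int × Int) × PySem.Set Int) x =>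
      if PySem.Set.contains p.2 x then p
      else
        let seen' := PySem.Set.add p.2 x
        let c : Int := (PySem.List.count lst x : Int)
        ((if 3 ≤ c ∧ p.1.2 < c then (some x, c) else p.1), seen'))
    (((none : Option Int), (0 : Int)), PySem.Set.empty)).1.1

-- ===== PRECONDITION & SPEC =====
def Spec_most_frequent_element (lst : List Int) (out : Option Int) : Prop := out = most_frequent_element_alt lst
instance (lst : List Int) (out : Option Int) : Decidable (Spec_most_frequent_element lst out) := by unfold Spec_most_frequent_element; infer_instance

-- ===== CLAIM (what is proved, stated in full; the proofs are below) =====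
def Claim_equal_most_frequent_element : Prop := ∀ (lst : List Int), Dom_most_frequent_element lst → Spec_most_frequent_element lst (most_frequent_element lst)

-- ===== LEMMAS AND PROOFS =====

-- A's counting loop builds Counter(lst): the contains-branch is `modify`, and on a
-- missing key `insert num 1` is `modify num 0 (· + 1)` since `getD _ 0 = 0` there.
lemma dictA_eq (lst : List Int) :
    lst.foldl
      (fun d num => if d.contains num then d.modify num 0 (· + 1) else d.insert num 1)
      PySem.Dict.empty
    = PySem.Dict.counter lst := by
  rw [← PySem.Dict.foldl_insert_getD_add_one_eq_counter]
  have main : ∀ (l : List Int) (d : PySem.Dict Int Int),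
      l.foldl (fun d num => if d.contains num then d.modify num 0 (· + 1) else d.insert num 1) d
      = l.foldl (fun d num => d.insert num (d.getD num 0 + 1)) d := by
    intro l
    induction l with
    | nil => intro d; rfl
    | cons x t ih =>
      intro d
      simp only [List.foldl_cons]
      rw [ih]
      by_cases hc : d.contains x
      · rw [if_pos hc]
        rfl
      · rw [if_neg hc,
          PySem.Dict.getD_of_not_contains (h := Bool.eq_false_iff.mpr hc)]
        norm_num
  exact main lst PySem.Dict.empty

-- the set built by a fold of Set.add only ever grows by appending
lemma foldl_add_prefix (t : List Int) : ∀ (s : List Int),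
    ∃ rest, t.foldl PySem.Set.add s = s ++ rest := by
  induction t with
  | nil => intro s; exact ⟨[], by simp⟩
  | cons x t ih =>
    intro s
    simp only [List.foldl_cons]
    by_cases hx : x ∈ s
    · rw [PySem.Set.add_of_mem hx]; exact ih s
    · rw [PySem.Set.add_of_not_mem hx]
      obtain ⟨rest, hr⟩ := ih (s ++ [x])
      exact ⟨[x] ++ rest, by simp [hr]⟩

-- MAIN INVARIANT for B's loop: the pass with a seen-set skip, started from seen
-- set s, folds g exactly over the fresh elements that Set.add appends after s.
lemma seen_fold {σ : Type} (g : σ → Int → σ) :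
    ∀ (l s : List Int) (a : σ),
    (l.foldl (fun (p : σ × PySem.Set Int) x =>
        if PySem.Set.contains p.2 x then p else (g p.1 x, PySem.Set.add p.2 x)) (a, s)).1
    = ((l.foldl PySem.Set.add s).drop s.length).foldl g a := by
  intro l
  induction l with
  | nil => intro s a; simp
  | cons x t ih =>
    intro s a
    simp only [List.foldl_cons]
    by_cases hx : x ∈ s
    · rw [if_pos ((PySem.Set.contains_iff s x).mpr hx), PySem.Set.add_of_mem hx]
      exact ih s a
    · rw [if_neg (fun h => hx ((PySem.Set.contains_iff s x).mp h)),
        PySem.Set.add_of_not_mem hx, ih (s ++ [x]) (g a x)]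
      obtain ⟨rest, hr⟩ := foldl_add_prefix t (s ++ [x])
      rw [hr, List.drop_left,
        show (s ++ [x] ++ rest).drop s.length = x :: rest from by
          rw [List.append_assoc]; exact List.drop_left' rfl,
        List.foldl_cons]

-- ===== VERDICT (by name: the statement is the Claim_ definition above) =====
theorem most_frequent_element_spec : Claim_equal_most_frequent_element := by
  intro lst _
  show most_frequent_element lst = most_frequent_element_alt lst
  unfold most_frequent_element most_frequent_element_alt
  simp only [dictA_eq, PySem.Dict.items_counter, List.foldl_map, PySem.List.count_eq]
  have hB := seen_fold (σ := Option Int × Int)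
    (fun st k =>
      if 3 ≤ ((lst.count k : Int)) ∧ st.2 < ((lst.count k : Int))
      then (some k, ((lst.count k : Int))) else st)
    lst [] ((none : Option Int), (0 : Int))
  simp only [List.length_nil, List.drop_zero] at hB
  rw [PySem.Set.ofList_eq_foldl, ← hB]
  rfl
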